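-- pv_equiv track=rewrite | github.com/fadimbarki87/Annual-Report-RAG-Agent | ingestion_pipeline/parsing/evaluate_parsing_quality.py | token_overlap_counts
-- ===== SOURCE A (Python) =====
-- from collections import Counter
--
-- def token_overlap_counts(reference_tokens: list[str], hypothesis_tokens: list[str]) -> tuple[int, int, int]:
--     reference_counter = Counter(reference_tokens)
--     hypothesis_counter = Counter(hypothesis_tokens)
--     matched = sum(
--         min(reference_counter[token], hypothesis_counter[token])
--         for token in reference_counter.keys() | hypothesis_counter.keys()
--     )
--     return matched, len(reference_tokens), len(hypothesis_tokens)
-- ===== SOURCE B (Python) =====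
-- from collections import Counter
--
--
-- def token_overlap_counts(reference_tokens: list[str], hypothesis_tokens: list[str]) -> tuple[int, int, int]:
--     remaining = Counter(reference_tokens)
--     matched = 0
--     for token in hypothesis_tokens:
--         if remaining[token] > 0:
--             matched += 1
--             remaining[token] -= 1
--     return matched, len(reference_tokens), len(hypothesis_tokens)
-- ===== Notes on version B (the rewrite author's own statement) =====
-- stated objective: alternative
-- what changed: Replaced the two-Counter min-over-union-of-keys aggregation by a single Counter of the reference tokens that is consumed in one scan over the hypothesis list (increment matched and decrement the count when positive).
import Mathlib
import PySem

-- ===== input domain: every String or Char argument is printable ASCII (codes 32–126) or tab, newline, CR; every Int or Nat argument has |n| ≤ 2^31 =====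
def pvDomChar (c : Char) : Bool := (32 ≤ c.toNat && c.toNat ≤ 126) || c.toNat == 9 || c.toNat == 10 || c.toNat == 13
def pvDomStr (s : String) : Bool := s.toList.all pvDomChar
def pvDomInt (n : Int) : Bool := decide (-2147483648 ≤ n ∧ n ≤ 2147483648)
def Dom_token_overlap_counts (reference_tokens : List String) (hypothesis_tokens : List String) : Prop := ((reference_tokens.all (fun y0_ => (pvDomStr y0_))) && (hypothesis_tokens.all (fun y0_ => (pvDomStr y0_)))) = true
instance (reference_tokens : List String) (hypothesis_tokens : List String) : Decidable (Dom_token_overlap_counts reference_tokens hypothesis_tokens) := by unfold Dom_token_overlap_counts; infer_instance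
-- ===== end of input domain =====

-- B replaces A's two-Counter min-over-union-of-keys aggregation by a single reference Counter
-- consumed in one scan over the hypothesis list (objective: alternative decomposition, same cost).


-- ===== PORT A =====
-- Python's sum over 'keys() | keys()' iterates a set in hash order; the summed value is
-- order-independent, so the port folds over the union in first-insertion order.
def token_overlap_counts (reference_tokens : List String) (hypothesis_tokens : List String) : Int × Int × Int :=
  let reference_counter := PySem.Dict.counter reference_tokens
  let hypothesis_counter := PySem.Dict.counter hypothesis_tokens
  let keyUnion : PySem.Set String := PySem.Set.union reference_counter.keys hypothesis_counter.keys
  let matched := keyUnion.foldl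
    (fun acc token => acc + min (reference_counter.getD token 0) (hypothesis_counter.getD token 0)) 0
  (matched, (reference_tokens.length : Int), (hypothesis_tokens.length : Int))

-- ===== PORT B =====
def token_overlap_counts_alt (reference_tokens : List String) (hypothesis_tokens : List String) : Int × Int × Int :=
  let final := hypothesis_tokens.foldl
    (fun (s : Int × PySem.Dict String Int) token =>
      if s.2.getD token 0 > 0 then (s.1 + 1, s.2.insert token (s.2.getD token 0 - 1)) else s)
    (0, PySem.Dict.counter reference_tokens)
  (final.1, (reference_tokens.length : Int), (hypothesis_tokens.length : Int))

-- ===== PRECONDITION & SPEC =====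
def Spec_token_overlap_counts (reference_tokens : List String) (hypothesis_tokens : List String) (out : Int × Int × Int) : Prop := out = token_overlap_counts_alt reference_tokens hypothesis_tokens
instance (reference_tokens : List String) (hypothesis_tokens : List String) (out : Int × Int × Int) : Decidable (Spec_token_overlap_counts reference_tokens hypothesis_tokens out) := by unfold Spec_token_overlap_counts; infer_instance

-- ===== CLAIM (what is proved, stated in full; the proofs are below) =====
def Claim_equal_token_overlap_counts : Prop := ∀ (reference_tokens : List String) (hypothesis_tokens : List String), Dom_token_overlap_counts reference_tokens hypothesis_tokens → Spec_token_overlap_counts reference_tokens hypothesis_tokens (token_overlap_counts reference_tokens hypothesis_tokens)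

-- ===== LEMMAS AND PROOFS =====

-- Abstract version of B's consuming scan: the dict is abstracted to its lookup function.
def pvConsume (D : String → Int) : List String → Int
  | [] => 0
  | h :: hs => if D h > 0 then 1 + pvConsume (Function.update D h (D h - 1)) hs else pvConsume D hs

-- B's fold equals the abstract consuming scan.
lemma pvFoldl_eq_consume (hs : List String) (d : PySem.Dict String Int) (m : Int) :
    (hs.foldl
      (fun (s : Int × PySem.Dict String Int) token =>
        if s.2.getD token 0 > 0 then (s.1 + 1, s.2.insert token (s.2.getD token 0 - 1)) else s)
      (m, d)).1 = m + pvConsume (fun t => d.getD t 0) hs := by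
  induction hs generalizing d m with
  | nil => simp [pvConsume]
  | cons h hs ih =>
    simp only [List.foldl_cons, pvConsume]
    by_cases hpos : d.getD h 0 > 0
    · simp only [hpos, if_pos]
      rw [ih]
      have : (fun t => (d.insert h (d.getD h 0 - 1)).getD t 0)
           = Function.update (fun t => d.getD t 0) h (d.getD h 0 - 1) := by
        funext t
        rw [PySem.Dict.getD_insert]
        by_cases ht : t = h <;> simp [Function.update, ht]
      rw [this]; ring
    · simp only [hpos, if_neg, not_false_eq_true]
      rw [ih]

lemma pvMin_step (a c : Int) (_ : 0 < a) (_ : 0 ≤ c) :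
    1 + min (a - 1) c = min a (c + 1) := by
  rcases le_total (a - 1) c with h | h <;> rcases le_total a (c + 1) with h' | h' <;>
    simp [min_def] <;> omega

-- The consuming scan computes the min-overlap sum over the scanned list's distinct tokens.
lemma pvConsume_eq_sum (hs : List String) (D : String → Int) (hD : ∀ t, 0 ≤ D t) :
    pvConsume D hs = ∑ t ∈ hs.toFinset, min (D t) (hs.count t : Int) := by
  induction hs generalizing D with
  | nil => simp [pvConsume]
  | cons h hs ih =>
    have split : ∀ (E : String → Int), (∀ t, 0 ≤ E t) →
        ∑ t ∈ hs.toFinset, min (E t) (hs.count t : Int)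
          = min (E h) (hs.count h : Int) + ∑ t ∈ hs.toFinset.erase h, min (E t) (hs.count t : Int) := by
      intro E hE
      by_cases hmem : h ∈ hs.toFinset
      · exact (Finset.add_sum_erase _ _ hmem).symm
      · rw [Finset.erase_eq_of_notMem hmem]
        have : (hs.count h : Int) = 0 := by
          simp [List.count_eq_zero_of_not_mem (by simpa using hmem)]
        rw [this]
        have : min (E h) (0 : Int) = 0 := by
          have := hE h; omega
        rw [this, zero_add]
    have rhs_split :
        ∑ t ∈ (h :: hs).toFinset, min (D t) ((h :: hs).count t : Int)
          = min (D h) ((hs.count h : Int) + 1) + ∑ t ∈ hs.toFinset.erase h, min (D t) (hs.count t : Int) := by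
      rw [List.toFinset_cons]
      rw [← Finset.add_sum_erase _ _ (Finset.mem_insert_self h hs.toFinset),
          Finset.erase_insert_eq_erase]
      congr 1
      · rw [List.count_cons_self]; push_cast; ring_nf
      · apply Finset.sum_congr rfl
        intro t ht
        have hne : t ≠ h := Finset.ne_of_mem_erase ht
        simp [Ne.symm hne]
    rw [rhs_split]
    simp only [pvConsume]
    by_cases hpos : D h > 0
    · rw [if_pos hpos]
      set D' := Function.update D h (D h - 1) with hD'
      have hD'nn : ∀ t, 0 ≤ D' t := by
        intro t; by_cases ht : t = h <;> simp [hD', ht] <;> [omega; exact hD t]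
      rw [ih D' hD'nn, split D' hD'nn]
      have e1 : ∀ t ∈ hs.toFinset.erase h, min (D' t) (hs.count t : Int) = min (D t) (hs.count t : Int) := by
        intro t ht
        have hne : t ≠ h := Finset.ne_of_mem_erase ht
        simp [hD', hne]
      rw [Finset.sum_congr rfl e1]
      have : D' h = D h - 1 := by simp [hD']
      rw [this, ← add_assoc, pvMin_step (D h) (hs.count h : Int) hpos (by positivity)]
    · rw [if_neg hpos]
      have hz : D h = 0 := le_antisymm (by omega) (hD h)
      rw [ih D hD, split D hD, hz]
      have c1 : min (0 : Int) ((hs.count h : Int)) = 0 := by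
        have : (0:Int) ≤ (hs.count h : Int) := by positivity
        omega
      have c2 : min (0 : Int) ((hs.count h : Int) + 1) = 0 := by
        have : (0:Int) ≤ (hs.count h : Int) := by positivity
        omega
      rw [c1, c2]

-- ===== VERDICT (by name: the statement is the Claim_ definition above) =====
theorem token_overlap_counts_spec : Claim_equal_token_overlap_counts := by
  intro ref hyp _
  unfold Spec_token_overlap_counts token_overlap_counts token_overlap_counts_alt
  simp only
  congr 1
  -- matched sides
  rw [pvFoldl_eq_consume]
  rw [zero_add]
  rw [pvConsume_eq_sum hyp (fun t => (PySem.Dict.counter ref).getD t 0)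
      (fun t => by simp [PySem.Dict.getD_counter])]
  -- A side: fold over the key union = sum over hyp's distinct tokens
  rw [PySem.List.foldl_add (g := fun token =>
        min ((PySem.Dict.counter ref).getD token 0) ((PySem.Dict.counter hyp).getD token 0))]
  rw [zero_add]
  set U : PySem.Set String :=
    PySem.Set.union (PySem.Dict.counter ref).keys (PySem.Dict.counter hyp).keys with hU
  have hUnodup : U.Nodup := PySem.Set.nodup_union _ _ (PySem.Dict.nodup_keys_counter ref)
  have hUmem : ∀ t, t ∈ U ↔ t ∈ ref ∨ t ∈ hyp := by
    intro t
    rw [hU, PySem.Set.mem_union, PySem.Dict.keys_counter, PySem.Dict.keys_counter,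
        PySem.Set.mem_ofList, PySem.Set.mem_ofList]
  rw [← List.sum_toFinset _ hUnodup]
  have hsub : hyp.toFinset ⊆ U.toFinset := by
    intro t ht
    rw [List.mem_toFinset] at *
    exact (hUmem t).2 (Or.inr ht)
  rw [Finset.sum_subset hsub]
  · apply Finset.sum_congr rfl
    intro t _
    rw [PySem.Dict.getD_counter, PySem.Dict.getD_counter]
  · intro t _ htn
    rw [List.mem_toFinset] at htn
    simp [PySem.Dict.getD_counter, List.count_eq_zero_of_not_mem htn]
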